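-- pv_equiv track=rewrite | github.com/snowskeleton/snowcrypt | src/aaxconverter/book.py | swapEndien
-- ===== SOURCE A (Python) =====
-- def swapEndien(string: str):
--     # adrmBlob is big endien, so we need to reverse it
--     list = [*string]
--     reversed = ''
--     for _ in range(int(len(list)/2)):
--         x = list.pop(-1)
--         y = list.pop(-1)
--         reversed += y + x
--     return reversed
-- ===== SOURCE B (Python) =====
-- def swapEndien(string: str):
--     # Build the 2-char chunks left-to-right (skipping the first char when the
--     # length is odd), then join them in reversed order.
--     s = len(string)
--     chunks = [string[i:i + 2] for i in range(s % 2, s, 2)]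
--     return ''.join(reversed(chunks))
-- ===== Notes on version B (the rewrite author's own statement) =====
-- stated objective: simpler
-- what changed: Replaces A's destructive pop-two-from-the-end loop that concatenates as it goes with a forward chunking pass (slices at offset len%2) followed by a single reversed join.
import Mathlib
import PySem

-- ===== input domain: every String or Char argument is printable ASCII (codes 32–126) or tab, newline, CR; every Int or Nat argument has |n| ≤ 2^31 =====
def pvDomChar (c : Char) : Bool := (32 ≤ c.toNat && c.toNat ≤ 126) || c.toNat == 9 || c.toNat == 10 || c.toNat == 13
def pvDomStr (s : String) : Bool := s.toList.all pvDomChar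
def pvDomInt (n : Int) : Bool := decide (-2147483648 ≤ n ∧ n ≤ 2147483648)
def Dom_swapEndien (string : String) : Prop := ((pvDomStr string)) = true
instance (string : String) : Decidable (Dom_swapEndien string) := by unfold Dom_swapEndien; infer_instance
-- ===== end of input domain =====

-- B replaces A's pop-from-the-end concatenation loop with a forward chunking
-- pass plus a reversed join (objective: simpler).

-- ===== PORT A =====
-- for _ in range(int(len(list)/2)): x = pop(-1); y = pop(-1); reversed += y + x
-- state = (list, reversed); the 'none' branches are unreachable (fuel = len/2)
def swapEndienLoop : Nat → List Char → List Char → List Char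
  | 0, _, acc => acc
  | n + 1, l, acc =>
      match PySem.List.pop? l with
      | none => acc
      | some (x, l1) =>
        match PySem.List.pop? l1 with
        | none => acc
        | some (y, l2) => swapEndienLoop n l2 (acc ++ [y, x])

def swapEndien (string : String) : String :=
  let list := string.toList
  String.ofList (swapEndienLoop (list.length / 2) list [])

-- ===== PORT B =====
def swapEndien_alt (string : String) : String :=
  let l := string.toList
  let s := l.length
  let chunks := (PySem.List.pyRange (s % 2 : Nat) (s : Nat) 2).map
      (fun i => PySem.List.slice l (some i) (some (i + 2)))
  String.ofList chunks.reverse.flatten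

-- ===== PRECONDITION & SPEC =====
def Spec_swapEndien (string : String) (out : String) : Prop := out = swapEndien_alt string
instance (string : String) (out : String) : Decidable (Spec_swapEndien string out) := by unfold Spec_swapEndien; infer_instance

-- ===== CLAIM (what is proved, stated in full; the proofs are below) =====
def Claim_equal_swapEndien : Prop := ∀ (string : String), Dom_swapEndien string → Spec_swapEndien string (swapEndien string)

-- ===== LEMMAS AND PROOFS =====

-- swap adjacent pairs, reading from the front; A's loop computes g on the reversed list
def pvG : List Char → List Char
  | x :: y :: r => y :: x :: pvG r
  | _ => []

-- forward 2-chunks; B's chunk list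
def pvChunk2 : List Char → List (List Char)
  | a :: b :: r => [a, b] :: pvChunk2 r
  | _ => []

theorem pvLoop_eq_g (r : List Char) : ∀ acc : List Char,
    swapEndienLoop (r.length / 2) r.reverse acc = acc ++ pvG r := by
  induction r using pvG.induct with
  | case1 x y r ih =>
      intro acc
      have h2 : (x :: y :: r).length / 2 = r.length / 2 + 1 := by
        simp [List.length_cons]; omega
      have hrev : (x :: y :: r).reverse = (r.reverse ++ [y]) ++ [x] := by
        simp
      rw [h2, hrev]
      simp only [swapEndienLoop, PySem.List.pop?_last]
      rw [ih (acc ++ [y, x])]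
      simp [pvG]
  | case2 t ht =>
      intro acc
      match t, ht with
      | [], _ => simp [swapEndienLoop, pvG]
      | [x], _ => simp [swapEndienLoop, pvG]
      | x :: y :: r, ht => exact (ht x y r rfl).elim

-- range-with-step-2 cons lemma
theorem pvRange_two_cons (a b : Int) (h : a < b) :
    PySem.List.pyRange a b 2 = a :: PySem.List.pyRange (a + 2) b 2 := by
  rw [PySem.List.pyRange_of_pos a b (by norm_num : (0:Int) < 2),
      PySem.List.pyRange_of_pos (a + 2) b (by norm_num : (0:Int) < 2)]
  have hn : ((b - a + 2 - 1) / 2).toNat =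
      (if a + 2 < b then ((b - (a + 2) + 2 - 1) / 2).toNat else 0) + 1 := by
    split_ifs <;> omega
  rw [if_pos h, hn, List.range_succ_eq_map]
  simp [List.map_map, Function.comp]
  intro k _
  ring

-- B's map-of-slices over the range is pvChunk2 of the dropped list
theorem pvMap_slice_eq_chunk2 (t : List Char) : ∀ (k : Nat) (l : List Char),
    l.drop k = t → t.length % 2 = 0 →
    (PySem.List.pyRange (k : Int) (l.length : Int) 2).map
        (fun i => PySem.List.slice l (some i) (some (i + 2))) = pvChunk2 t := by
  induction t using pvChunk2.induct with
  | case1 a b r ih =>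
      intro k l hdrop heven
      have hk : k < l.length := by
        by_contra hge
        rw [List.drop_eq_nil_of_le (by omega)] at hdrop
        exact absurd hdrop (by simp)
      rw [pvRange_two_cons _ _ (by exact_mod_cast hk)]
      have hcast : ((k : Int) + 2) = ((k + 2 : Nat) : Int) := by push_cast; ring
      have hslice : PySem.List.slice l (some (k : Int)) (some ((k : Int) + 2)) = [a, b] := by
        have := PySem.List.slice_natCast_add l k 2
        rw [show ((k : Int) + ((2:Nat) : Int)) = (k : Int) + 2 by push_cast; ring] at this
        rw [this, hdrop]
        rfl
      have hdrop' : l.drop (k + 2) = r := by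
        have h2 : l.drop (k + 2) = (l.drop k).drop 2 := by
          rw [List.drop_drop]
        rw [h2, hdrop]
        rfl
      have heven' : r.length % 2 = 0 := by
        simp [List.length_cons] at heven; omega
      rw [List.map_cons, hslice, hcast, ih (k + 2) l hdrop' heven']
      rfl
  | case2 t ht =>
      intro k l hdrop heven
      match t, ht with
      | [], _ =>
          have hk : l.length ≤ k := List.drop_eq_nil_iff.mp hdrop
          rw [PySem.List.pyRange_of_pos _ _ (by norm_num : (0:Int) < 2)]
          rw [if_neg (by exact_mod_cast not_lt.mpr hk)]
          simp [pvChunk2]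
      | [x], _ => simp at heven
      | x :: y :: r, ht => exact (ht x y r rfl).elim

-- pvG distributes over append when the left part has even length
theorem pvG_append (u : List Char) : ∀ v : List Char, u.length % 2 = 0 →
    pvG (u ++ v) = pvG u ++ pvG v := by
  induction u using pvG.induct with
  | case1 x y r ih =>
      intro v hev
      have : r.length % 2 = 0 := by simp [List.length_cons] at hev; omega
      simp [pvG, ih v this]
  | case2 t ht =>
      intro v hev
      match t, ht with
      | [], _ => simp [pvG]
      | [x], _ => simp at hev
      | x :: y :: r, ht => exact (ht x y r rfl).elim

-- pvG of the reverse is the reversed-flattened chunk list (even length)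
theorem pvG_rev_eq_chunks (t : List Char) : t.length % 2 = 0 →
    pvG t.reverse = (pvChunk2 t).reverse.flatten := by
  induction t using pvChunk2.induct with
  | case1 a b r ih =>
      intro hev
      have hev' : r.length % 2 = 0 := by simp [List.length_cons] at hev; omega
      have hr : (a :: b :: r).reverse = r.reverse ++ [b, a] := by simp
      rw [hr, pvG_append r.reverse [b, a] (by simpa using hev'), ih hev']
      simp [pvG, pvChunk2]
  | case2 t ht =>
      intro hev
      match t, ht with
      | [], _ => simp [pvG, pvChunk2]
      | [x], _ => simp at hev
      | x :: y :: r, ht => exact (ht x y r rfl).elim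

-- ===== VERDICT (by name: the statement is the Claim_ definition above) =====
theorem swapEndien_spec : Claim_equal_swapEndien := by
  intro string _
  unfold Spec_swapEndien swapEndien swapEndien_alt
  set l := string.toList with hl
  have hA : swapEndienLoop (l.length / 2) l [] = pvG l.reverse := by
    have := pvLoop_eq_g l.reverse []
    simpa using this
  have ht : (l.drop (l.length % 2)).length % 2 = 0 := by
    simp [List.length_drop]; omega
  have hB : (PySem.List.pyRange ((l.length % 2 : Nat) : Int) ((l.length : Nat) : Int) 2).map
      (fun i => PySem.List.slice l (some i) (some (i + 2)))
      = pvChunk2 (l.drop (l.length % 2)) :=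
    pvMap_slice_eq_chunk2 _ _ _ rfl ht
  simp only [hA, hB]
  congr 1
  rw [← pvG_rev_eq_chunks _ ht]
  rcases Nat.even_or_odd l.length with he | ho
  · have : l.length % 2 = 0 := Nat.even_iff.mp he
    rw [this, List.drop_zero]
  · have h1 : l.length % 2 = 1 := Nat.odd_iff.mp ho
    rw [h1]
    match l, h1 with
    | c :: t, h1 =>
        have hev : t.length % 2 = 0 := by simp [List.length_cons] at h1; omega
        simp only [List.drop_one, List.tail_cons, List.reverse_cons]
        rw [pvG_append t.reverse [c] (by simpa using hev)]
        simp [pvG]
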